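-- pv_equiv track=rewrite | github.com/RoyRin/InformationTheory | compression_Tcodes1.py | generateOrderedString
-- ===== SOURCE A (Python) =====
-- def generateOrderedString(n):
-- 	s = ""
-- 	for i in range(n):
-- 		for j in range(5):
-- 			if(i%2 == 0):
-- 				s += str(1)
-- 			else:
-- 				s+=str(0)
-- 	return s
-- ===== SOURCE B (Python) =====
-- def generateOrderedString(n):
--     m = max(n, 0)
--     return "1111100000" * (m // 2) + "11111" * (m % 2)
-- ===== Notes on version B (the rewrite author's own statement) =====
-- stated objective: faster
-- what changed: Replaces the nested per-character loop with closed-form string repetition of the ten-character block pattern plus an optional trailing five-ones block for odd counts (negative counts clamped to zero).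
import Mathlib
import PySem

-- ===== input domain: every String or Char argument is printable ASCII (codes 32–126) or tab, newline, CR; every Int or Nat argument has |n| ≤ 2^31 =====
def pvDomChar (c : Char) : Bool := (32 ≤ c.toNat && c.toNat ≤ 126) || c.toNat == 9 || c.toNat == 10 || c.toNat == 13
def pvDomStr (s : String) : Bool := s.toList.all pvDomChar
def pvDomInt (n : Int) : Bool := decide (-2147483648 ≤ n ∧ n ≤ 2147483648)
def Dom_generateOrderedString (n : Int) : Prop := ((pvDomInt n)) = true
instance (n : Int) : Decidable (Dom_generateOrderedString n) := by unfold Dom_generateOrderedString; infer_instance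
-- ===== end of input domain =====

-- B builds the output closed-form by repeating the "1111100000" block instead of A's nested per-character loop.

-- ===== PORT A =====
def generateOrderedString (n : Int) : String :=
  (PySem.List.pyRange 0 n 1).foldl (fun s i =>
    (PySem.List.pyRange 0 5 1).foldl (fun s _ =>
      if PySem.Int.mod i 2 == 0 then s ++ PySem.Int.toStr 1 else s ++ PySem.Int.toStr 0) s) ""

-- ===== PORT B =====
-- Python string repetition s * k
def strRepeat (s : String) (k : Nat) : String :=
  match k with
  | 0 => ""
  | k + 1 => s ++ strRepeat s k

def generateOrderedString_alt (n : Int) : String :=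
  let m := max n 0
  strRepeat "1111100000" (PySem.Int.floordiv m 2).toNat ++
    strRepeat "11111" (PySem.Int.mod m 2).toNat

-- ===== PRECONDITION & SPEC =====
def Spec_generateOrderedString (n : Int) (out : String) : Prop := out = generateOrderedString_alt n
instance (n : Int) (out : String) : Decidable (Spec_generateOrderedString n out) := by unfold Spec_generateOrderedString; infer_instance

-- ===== CLAIM (what is proved, stated in full; the proofs are below) =====
def Claim_equal_generateOrderedString : Prop := ∀ (n : Int), Dom_generateOrderedString n → Spec_generateOrderedString n (generateOrderedString n)

-- ===== LEMMAS AND PROOFS =====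

theorem strRepeat_succ_right (s : String) (k : Nat) :
    strRepeat s (k + 1) = strRepeat s k ++ s := by
  induction k with
  | zero => simp [strRepeat]
  | succ k ih =>
    calc strRepeat s (k + 1 + 1) = s ++ strRepeat s (k + 1) := rfl
      _ = s ++ (strRepeat s k ++ s) := by rw [ih]
      _ = (s ++ strRepeat s k) ++ s := by rw [String.append_assoc]
      _ = strRepeat s (k + 1) ++ s := rfl

-- A's inner loop over range(5) appends one five-character block
theorem innerBlock (i : Int) (s : String) :
    (PySem.List.pyRange 0 5 1).foldl (fun s _ =>
      if PySem.Int.mod i 2 == 0 then s ++ PySem.Int.toStr 1 else s ++ PySem.Int.toStr 0) s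
    = s ++ (if PySem.Int.mod i 2 == 0 then "11111" else "00000") := by
  rw [show PySem.List.pyRange 0 5 1 = [0,1,2,3,4] by decide]
  cases h : PySem.Int.mod i 2 == 0
  · simp only [List.foldl, Bool.false_eq_true, if_false, String.append_assoc]
    congr 1
  · simp only [List.foldl, if_true, String.append_assoc]
    congr 1

-- A on the natural m agrees with the closed form
theorem core (m : Nat) :
    generateOrderedString (m : Int)
    = strRepeat "1111100000" (m / 2) ++ strRepeat "11111" (m % 2) := by
  induction m with
  | zero => simp [generateOrderedString, strRepeat]
  | succ m ih =>
    unfold generateOrderedString at ih ⊢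
    rw [show ((m + 1 : Nat) : Int) = (m : Int) + 1 by push_cast; ring,
        PySem.List.pyRange_one_succ_right (by positivity),
        List.foldl_append, ih]
    simp only [List.foldl, innerBlock]
    rcases Nat.even_or_odd m with ⟨k, hk⟩ | ⟨k, hk⟩
    · subst hk
      have hmod : (PySem.Int.mod ((k + k : Nat) : Int) 2 == 0) = true := by
        simp [PySem.Int.mod, Int.fmod_eq_emod]
        omega
      have h1 : (k + k) % 2 = 0 := by omega
      have h2 : (k + k + 1) % 2 = 1 := by omega
      have h3 : (k + k) / 2 = k := by omega
      have h4 : (k + k + 1) / 2 = k := by omega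
      rw [h1, h2, h3, h4]
      simp only [hmod, if_true]
      simp [strRepeat]
    · subst hk
      have hmod : (PySem.Int.mod ((2 * k + 1 : Nat) : Int) 2 == 0) = false := by
        simp [PySem.Int.mod, Int.fmod_eq_emod]
      have h1 : (2 * k + 1) % 2 = 1 := by omega
      have h2 : (2 * k + 1 + 1) % 2 = 0 := by omega
      have h3 : (2 * k + 1) / 2 = k := by omega
      have h4 : (2 * k + 1 + 1) / 2 = k + 1 := by omega
      rw [h1, h2, h3, h4]
      simp only [hmod, Bool.false_eq_true, if_false]
      rw [strRepeat_succ_right "1111100000" k]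
      simp only [strRepeat, String.append_assoc]
      congr 1

theorem gos_neg (n : Int) (h : n ≤ 0) : generateOrderedString n = "" := by
  unfold generateOrderedString
  rw [PySem.List.pyRange_one_eq_nil h]
  rfl

-- ===== VERDICT (by name: the statement is the Claim_ definition above) =====
theorem generateOrderedString_spec : Claim_equal_generateOrderedString := by
  intro n _
  unfold Spec_generateOrderedString generateOrderedString_alt
  rcases le_or_gt n 0 with h | h
  · rw [gos_neg n h, max_eq_right h]
    simp [PySem.Int.floordiv, PySem.Int.mod, strRepeat]
  · obtain ⟨m, rfl⟩ : ∃ m : Nat, n = (m : Int) := ⟨n.toNat, (Int.toNat_of_nonneg (le_of_lt h)).symm⟩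
    rw [core m]
    have hm : max ((m : Int)) 0 = (m : Int) := max_eq_left (by positivity)
    simp only [hm]
    congr 2
    · simp [PySem.Int.floordiv, Int.fdiv_eq_ediv]; omega
    · simp [PySem.Int.mod, Int.fmod_eq_emod]; omega
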